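-- pv_equiv track=rewrite | github.com/ma-ji/zotero-mcp | src/zotero_mcp/chroma_client.py | _candidate_batch_sizes
-- ===== SOURCE A (Python) =====
-- def _candidate_batch_sizes(start: int) -> list[int]:
--     start = max(1, int(start))
--     candidates = []
--     bs = start
--     while bs >= 1:
--         candidates.append(bs)
--         if bs == 1:
--             break
--         bs = max(1, bs // 2)
--     return candidates
-- ===== SOURCE B (Python) =====
-- def _candidate_batch_sizes(start: int) -> list[int]:
--     # Build the ascending binary prefixes of start (each MSB-first prefix of
--     # bin(start) is one candidate), then reverse: prefix of k top bits == start >> (L-k).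
--     start = max(1, int(start))
--     acc = 0
--     prefixes = []
--     for ch in bin(start)[2:]:
--         acc = acc * 2 + (1 if ch == '1' else 0)
--         prefixes.append(acc)
--     prefixes.reverse()
--     return prefixes
-- ===== Notes on version B (the rewrite author's own statement) =====
-- stated objective: alternative
-- what changed: B builds the ascending binary prefixes of start by a doubling accumulator over bin(start)'s digits MSB-first and reverses the list, instead of A's while-loop that repeatedly halves a running value down to 1.
import Mathlib
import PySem

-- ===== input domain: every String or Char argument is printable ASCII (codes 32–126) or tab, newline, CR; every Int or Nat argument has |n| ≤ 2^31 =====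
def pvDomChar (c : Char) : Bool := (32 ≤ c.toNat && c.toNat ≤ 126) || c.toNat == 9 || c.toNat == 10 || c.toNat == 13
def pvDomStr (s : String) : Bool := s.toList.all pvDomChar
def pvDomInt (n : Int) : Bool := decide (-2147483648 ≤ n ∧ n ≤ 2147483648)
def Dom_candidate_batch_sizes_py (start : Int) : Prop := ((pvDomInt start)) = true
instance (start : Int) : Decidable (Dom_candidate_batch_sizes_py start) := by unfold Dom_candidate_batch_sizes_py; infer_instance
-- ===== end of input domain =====

-- B builds the ascending binary prefixes of start by a doubling accumulator over the
-- binary digits MSB-first and reverses, instead of A's halving-down while loop; objective: alternative.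

-- ===== PORT A =====
-- the while loop of A: carries the current value bs and the accumulator `candidates`
def pvLoopA (bs : Int) (acc : List Int) : List Int :=
  if _h : 1 ≤ bs then
    let acc' := acc ++ [bs]
    if bs = 1 then acc'
    else pvLoopA (max 1 (PySem.Int.floordiv bs 2)) acc'
  else acc
termination_by bs.toNat
decreasing_by
  rw [PySem.Int.floordiv_eq_ediv_of_pos (by omega)]
  omega

def candidate_batch_sizes_py (start : Int) : List Int :=
  pvLoopA (max 1 start) []

-- ===== PORT B =====
-- the digits of bin(s)[2:], MSB first (s ≥ 1 in use; s = 0 gives [])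
def pvBits (n : Nat) : List Nat :=
  if _h : n = 0 then [] else pvBits (n / 2) ++ [n % 2]
termination_by n
decreasing_by omega

-- one step of B's for-loop: double the accumulator, add the digit, append
def pvStep (st : Int × List Int) (b : Nat) : Int × List Int :=
  let acc := st.1 * 2 + (b : Int)
  (acc, st.2 ++ [acc])

def candidate_batch_sizes_py_alt (start : Int) : List Int :=
  let s := max 1 start
  (((pvBits s.toNat).foldl pvStep (0, [])).2).reverse

-- ===== PRECONDITION & SPEC =====
def Spec_candidate_batch_sizes_py (start : Int) (out : List Int) : Prop := out = candidate_batch_sizes_py_alt start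
instance (start : Int) (out : List Int) : Decidable (Spec_candidate_batch_sizes_py start out) := by unfold Spec_candidate_batch_sizes_py; infer_instance

-- ===== CLAIM (what is proved, stated in full; the proofs are below) =====
def Claim_equal_candidate_batch_sizes_py : Prop := ∀ (start : Int), Dom_candidate_batch_sizes_py start → Spec_candidate_batch_sizes_py start (candidate_batch_sizes_py start)

-- ===== LEMMAS AND PROOFS =====

theorem pvBits_zero : pvBits 0 = [] := by rw [pvBits]; simp

theorem pvBits_one : pvBits 1 = [1] := by rw [pvBits]; simp [pvBits_zero]

theorem pv_shiftRight_natCast (n k : Nat) : ((n : Int) >>> k) = ((n >>> k : Nat) : Int) := rfl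

-- both sides are characterised by the same shift map, indexed by the number of binary digits
theorem pv_loopA_eq (n : Nat) (hn : 1 ≤ n) (acc : List Int) :
    pvLoopA (n : Int) acc
      = acc ++ (List.range (pvBits n).length).map (fun k : Nat => (n : Int) >>> k) := by
  induction n using Nat.strong_induction_on generalizing acc with
  | _ n ih =>
    rw [pvLoopA]
    by_cases h1 : n = 1
    · subst h1
      simp only [Nat.cast_one]
      rw [dif_pos (by norm_num), if_pos trivial]
      rw [pvBits_one]
      norm_num
    · have h2 : 2 ≤ n := by omega
      have hle : 1 ≤ (n : Int) := by exact_mod_cast hn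
      rw [dif_pos hle, if_neg (by exact_mod_cast h1)]
      have hfd : PySem.Int.floordiv (n : Int) 2 = ((n / 2 : Nat) : Int) := by
        exact_mod_cast PySem.Int.floordiv_natCast n 2
      have hmax : max 1 (PySem.Int.floordiv (n : Int) 2) = ((n / 2 : Nat) : Int) := by
        rw [hfd]; omega
      rw [hmax, ih (n / 2) (by omega) (by omega)]
      have hlen : (pvBits n).length = (pvBits (n / 2)).length + 1 := by
        conv_lhs => rw [pvBits]
        rw [dif_neg (by omega)]; simp
      rw [hlen, List.range_succ_eq_map, List.map_cons, List.map_map]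
      have hmapeq : ((List.range (pvBits (n / 2)).length).map
            ((fun k : Nat => (n : Int) >>> k) ∘ Nat.succ))
          = (List.range (pvBits (n / 2)).length).map
            (fun k : Nat => ((n / 2 : Nat) : Int) >>> k) := by
        apply List.map_congr_left
        intro k _
        show (n : Int) >>> (k + 1) = ((n / 2 : Nat) : Int) >>> k
        rw [pv_shiftRight_natCast, pv_shiftRight_natCast]
        congr 1
        rw [Nat.shiftRight_succ_inside]
      rw [hmapeq]
      simp

-- B's fold over the MSB-first digits reconstructs n and lists the prefixes, i.e. the shifts in ascending order
theorem pv_foldB (n : Nat) (hn : 1 ≤ n) :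
    (pvBits n).foldl pvStep (0, [])
      = ((n : Int), ((List.range (pvBits n).length).map (fun k : Nat => (n : Int) >>> k)).reverse) := by
  induction n using Nat.strong_induction_on with
  | _ n ih =>
    by_cases h1 : n = 1
    · subst h1
      rw [pvBits_one]
      simp only [List.foldl_cons, List.foldl_nil]
      unfold pvStep
      norm_num
    · have h2 : 2 ≤ n := by omega
      conv_lhs => rw [pvBits]
      rw [dif_neg (by omega), List.foldl_append, ih (n / 2) (by omega) (by omega)]
      have hacc : pvStep ((((n / 2 : Nat)) : Int),
            ((List.range (pvBits (n / 2)).length).map (fun k : Nat => ((n / 2 : Nat) : Int) >>> k)).reverse) (n % 2)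
          = ((n : Int),
            ((List.range (pvBits (n / 2)).length).map (fun k : Nat => ((n / 2 : Nat) : Int) >>> k)).reverse ++ [(n : Int)]) := by
        unfold pvStep
        have hv : ((n / 2 : Nat) : Int) * 2 + ((n % 2 : Nat) : Int) = (n : Int) := by
          push_cast; omega
        dsimp only
        rw [hv]
      simp only [List.foldl_cons, List.foldl_nil, hacc]
      have hlen : (pvBits n).length = (pvBits (n / 2)).length + 1 := by
        conv_lhs => rw [pvBits]
        rw [dif_neg (by omega)]; simp
      rw [hlen, List.range_succ_eq_map, List.map_cons, List.map_map]
      have hmapeq : ((List.range (pvBits (n / 2)).length).map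
            ((fun k : Nat => (n : Int) >>> k) ∘ Nat.succ))
          = (List.range (pvBits (n / 2)).length).map
            (fun k : Nat => ((n / 2 : Nat) : Int) >>> k) := by
        apply List.map_congr_left
        intro k _
        show (n : Int) >>> (k + 1) = ((n / 2 : Nat) : Int) >>> k
        rw [pv_shiftRight_natCast, pv_shiftRight_natCast]
        congr 1
        rw [Nat.shiftRight_succ_inside]
      rw [hmapeq, List.reverse_cons]
      simp

-- ===== VERDICT (by name: the statement is the Claim_ definition above) =====
theorem candidate_batch_sizes_py_spec : Claim_equal_candidate_batch_sizes_py := by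
  intro start _
  unfold Spec_candidate_batch_sizes_py candidate_batch_sizes_py candidate_batch_sizes_py_alt
  have hs : (1 : Int) ≤ max 1 start := le_max_left _ _
  have hcast : ((max 1 start).toNat : Int) = max 1 start := Int.toNat_of_nonneg (by omega)
  have hA := pv_loopA_eq (max 1 start).toNat (by omega) []
  have hB := pv_foldB (max 1 start).toNat (by omega)
  rw [hcast] at hA hB
  simp only [hB]
  rw [hA]
  simp
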